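-- pv_equiv track=rewrite | github.com/MattKotzbauer/252-final-project | helpers.py | table_hop
-- ===== SOURCE A (Python) =====
-- def table_hop(table1, table2):
--     table1.sort(key=lambda x: x[-2])
--     table2.sort(key=lambda x: x[0])
--     new_list = []
--     i, j = 0, 0
--     while i < len(table1) and j < len(table2):
--         if table1[i][-2] == table2[j][0]:
--             new_list.append([table1[i], table2[j]])
--             i += 1
--             j += 1
--         elif table1[i][-2] < table2[j][0]:
--             i += 1
--         else:
--             j += 1
--     return new_list
-- ===== SOURCE B (Python) =====
-- def table_hop(table1, table2):
--     table1.sort(key=lambda x: x[-2])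
--     table2.sort(key=lambda x: x[0])
--     groups = {}
--     for row in table2:
--         groups.setdefault(row[0], []).append(row)
--     used = {}
--     new_list = []
--     for row in table1:
--         key = row[-2]
--         group = groups.get(key)
--         if group is None:
--             continue
--         k = used.get(key, 0)
--         if k < len(group):
--             new_list.append([row, group[k]])
--             used[key] = k + 1
--     return new_list
-- ===== Notes on version B (the rewrite author's own statement) =====
-- stated objective: alternative
-- what changed: Replaces A's two-pointer merge walk over the two sorted tables by a hash index: group sorted table2's rows by key in a dict, then iterate sorted table1 consuming each key's group through a per-key counter.
import Mathlib
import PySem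

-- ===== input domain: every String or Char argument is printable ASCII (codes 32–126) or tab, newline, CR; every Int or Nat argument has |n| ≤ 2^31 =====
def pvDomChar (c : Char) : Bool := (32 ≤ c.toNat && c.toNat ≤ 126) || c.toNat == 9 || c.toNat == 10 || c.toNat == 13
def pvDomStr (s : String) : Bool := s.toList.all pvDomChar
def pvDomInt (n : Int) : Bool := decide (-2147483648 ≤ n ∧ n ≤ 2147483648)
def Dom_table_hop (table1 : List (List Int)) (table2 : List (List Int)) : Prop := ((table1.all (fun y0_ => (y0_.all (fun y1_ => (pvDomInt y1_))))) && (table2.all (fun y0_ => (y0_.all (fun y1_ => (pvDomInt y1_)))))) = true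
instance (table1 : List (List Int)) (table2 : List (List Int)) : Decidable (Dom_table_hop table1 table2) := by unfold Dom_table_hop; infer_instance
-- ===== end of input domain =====

-- B replaces A's two-pointer merge walk by a hash index over table2 (key -> its rows in
-- sorted order) consumed with per-key counters while iterating the sorted table1: an
-- alternative decomposition of the same O(n log n) join (the sorts dominate both).
-- Both A and B sort BOTH argument lists in place (identical observable mutation);
-- the equivalence proved here is about the return value.

-- shared key lambdas (both Python sources write exactly `lambda x: x[-2]` / row[0] etc.)
def pyKeyA (x : List Int) : Int := PySem.List.pyGetD x (-2) 0   -- x[-2], total under Pre_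
def pyKeyB (x : List Int) : Int := PySem.List.pyGetD x 0 0      -- x[0],  total under Pre_

-- ===== PORT A =====
-- the while loop with indices i, j over the two sorted tables (fuel only makes the
-- loop structurally total; table_hop passes enough for the loop never to run out)
def tableHopLoop (s1 s2 : List (List Int)) :
    Nat → Nat → Nat → List (List (List Int)) → List (List (List Int))
  | 0, _, _, acc => acc
  | fuel + 1, i, j, acc =>
    if i < s1.length ∧ j < s2.length then
      if pyKeyA (s1.getD i []) = pyKeyB (s2.getD j []) then
        tableHopLoop s1 s2 fuel (i+1) (j+1) (acc ++ [[s1.getD i [], s2.getD j []]])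
      else if pyKeyA (s1.getD i []) < pyKeyB (s2.getD j []) then
        tableHopLoop s1 s2 fuel (i+1) j acc
      else
        tableHopLoop s1 s2 fuel i (j+1) acc
    else acc

def table_hop (table1 : List (List Int)) (table2 : List (List Int)) : List (List (List Int)) :=
  let t1 := PySem.List.sorted table1 pyKeyA
  let t2 := PySem.List.sorted table2 pyKeyB
  tableHopLoop t1 t2 (t1.length + t2.length) 0 0 []

-- ===== PORT B =====
-- groups.setdefault(row[0], []).append(row) over sorted table2
def buildGroups (t2 : List (List Int)) : PySem.Dict Int (List (List Int)) :=
  t2.foldl (fun d row => d.modify (pyKeyB row) [] (fun g => g ++ [row])) PySem.Dict.empty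

-- one iteration of B's loop over sorted table1: state = (used counters, output)
def hopStep (groups : PySem.Dict Int (List (List Int)))
    (st : PySem.Dict Int Int × List (List (List Int))) (row : List Int) :
    PySem.Dict Int Int × List (List (List Int)) :=
  match groups.get? (pyKeyA row) with
  | none => st
  | some group =>
    let k := st.1.getD (pyKeyA row) 0
    if k < (group.length : Int) then
      (st.1.insert (pyKeyA row) (k+1), st.2 ++ [[row, PySem.List.pyGetD group k []]])
    else st

def table_hop_alt (table1 : List (List Int)) (table2 : List (List Int)) : List (List (List Int)) :=
  let t1 := PySem.List.sorted table1 pyKeyA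
  let t2 := PySem.List.sorted table2 pyKeyB
  (t1.foldl (hopStep (buildGroups t2)) (PySem.Dict.empty, [])).2

-- ===== PRECONDITION & SPEC =====
-- Pre_ excludes exactly the inputs where Python A raises IndexError: a table1 row shorter
-- than 2 (row[-2]) or an empty table2 row (row[0]).
def Pre_table_hop (table1 : List (List Int)) (table2 : List (List Int)) : Prop :=
  (∀ r ∈ table1, 2 ≤ r.length) ∧ (∀ r ∈ table2, 1 ≤ r.length)
instance (table1 : List (List Int)) (table2 : List (List Int)) : Decidable (Pre_table_hop table1 table2) := by unfold Pre_table_hop; infer_instance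

def pvWitness_table_hop : List (List Int) × List (List Int) :=
  ([[1, 2], [3, 4], [0, 3, 9]], [[2, 7], [3], [2, 5]])

def Spec_table_hop (table1 : List (List Int)) (table2 : List (List Int)) (out : List (List (List Int))) : Prop := out = table_hop_alt table1 table2
instance (table1 : List (List Int)) (table2 : List (List Int)) (out : List (List (List Int))) : Decidable (Spec_table_hop table1 table2 out) := by unfold Spec_table_hop; infer_instance

-- ===== CLAIM (what is proved, stated in full; the proofs are below) =====
def Claim_equal_table_hop : Prop := ∀ (table1 : List (List Int)) (table2 : List (List Int)), Dom_table_hop table1 table2 → Pre_table_hop table1 table2 → Spec_table_hop table1 table2 (table_hop table1 table2)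

-- ===== LEMMAS AND PROOFS =====

-- cons-level reading of A's merge walk
def cmerge : List (List Int) → List (List Int) → List (List (List Int))
  | [], _ => []
  | _ :: _, [] => []
  | a :: as, b :: bs =>
    if pyKeyA a = pyKeyB b then [a, b] :: cmerge as bs
    else if pyKeyA a < pyKeyB b then cmerge as (b :: bs)
    else cmerge (a :: as) bs
termination_by s1 s2 => s1.length + s2.length

-- the common shape: walk sorted table1 block by equal-key block, pair the block
-- elementwise (zip truncates) with f key = the key's rows of sorted table2
def jblocks (f : Int → List (List Int)) : List (List Int) → List (List (List Int))
  | [] => []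
  | a :: as =>
    ((a :: as.takeWhile (fun x => pyKeyA x = pyKeyA a)).zip (f (pyKeyA a))).map
        (fun p => [p.1, p.2])
      ++ jblocks f (as.dropWhile (fun x => pyKeyA x = pyKeyA a))
termination_by s => s.length
decreasing_by simpa using Nat.lt_succ_of_le (List.length_dropWhile_le _ _)

theorem cmerge_nil_right (s1 : List (List Int)) : cmerge s1 [] = [] := by
  cases s1 <;> simp [cmerge]

theorem tableHopLoop_eq_cmerge (s1 s2 : List (List Int)) :
    ∀ fuel i j acc, (s1.length - i) + (s2.length - j) ≤ fuel →
      tableHopLoop s1 s2 fuel i j acc = acc ++ cmerge (s1.drop i) (s2.drop j) := by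
  intro fuel
  induction fuel with
  | zero =>
    intro i j acc hf
    have hi : s1.length ≤ i := by omega
    rw [tableHopLoop, List.drop_eq_nil_of_le hi]
    simp [cmerge]
  | succ fuel ih =>
    intro i j acc hf
    rw [tableHopLoop]
    by_cases h : i < s1.length ∧ j < s2.length
    · rw [if_pos h, List.drop_eq_getElem_cons h.1, List.drop_eq_getElem_cons h.2]
      by_cases heq : pyKeyA (s1.getD i []) = pyKeyB (s2.getD j [])
      · rw [if_pos heq, ih _ _ _ (by omega)]
        simp only [cmerge, List.getD_eq_getElem _ _ h.1, List.getD_eq_getElem _ _ h.2] at heq ⊢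
        rw [if_pos heq]
        simp
      · rw [if_neg heq]
        by_cases hlt : pyKeyA (s1.getD i []) < pyKeyB (s2.getD j [])
        · rw [if_pos hlt, ih _ _ _ (by omega), List.drop_eq_getElem_cons h.2]
          simp only [cmerge, List.getD_eq_getElem _ _ h.1, List.getD_eq_getElem _ _ h.2]
            at heq hlt ⊢
          rw [if_neg heq, if_pos hlt]
        · rw [if_neg hlt, ih _ _ _ (by omega), List.drop_eq_getElem_cons h.1]
          simp only [cmerge, List.getD_eq_getElem _ _ h.1, List.getD_eq_getElem _ _ h.2]
            at heq hlt ⊢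
          rw [if_neg heq, if_neg hlt]
    · rw [if_neg h]
      rcases Nat.lt_or_ge i s1.length with hi | hi
      · have hj : s2.length ≤ j := by omega
        rw [List.drop_eq_nil_of_le hj, cmerge_nil_right, List.append_nil]
      · rw [List.drop_eq_nil_of_le hi]
        simp [cmerge]

-- a sorted list splits at key k into strictly-below / equal / strictly-above, and the
-- equal block is the filter
theorem sorted_filter_decomp {α : Type} (key : α → Int) (s : List α)
    (hs : s.Pairwise (fun a b => key a ≤ key b)) (k : Int) :
    ∃ p m q, s = p ++ m ++ q ∧ (∀ b ∈ p, key b < k) ∧ (∀ b ∈ m, key b = k) ∧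
      (∀ b ∈ q, k < key b) ∧ s.filter (fun b => key b = k) = m := by
  induction s with
  | nil => exact ⟨[], [], [], by simp, by simp, by simp, by simp, by simp⟩
  | cons b s ih =>
    obtain ⟨hb, hs'⟩ := List.pairwise_cons.mp hs
    rcases lt_trichotomy (key b) k with h | h | h
    · obtain ⟨p, m, q, e, hp, hm, hq, hf⟩ := ih hs'
      refine ⟨b :: p, m, q, by simp [e], ?_, hm, hq, ?_⟩
      · intro x hx
        rcases List.mem_cons.mp hx with rfl | hx
        · exact h
        · exact hp x hx
      · simpa [List.filter_cons, h.ne] using hf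
    · obtain ⟨p, m, q, e, hp, hm, hq, hf⟩ := ih hs'
      have hp0 : p = [] := by
        cases p with
        | nil => rfl
        | cons x xs =>
          have h1 : key x < k := hp x List.mem_cons_self
          have h2 : key b ≤ key x := hb x (by rw [e]; simp)
          omega
      subst hp0
      refine ⟨[], b :: m, q, by simpa using e, by simp, ?_, hq, ?_⟩
      · intro x hx
        rcases List.mem_cons.mp hx with rfl | hx
        · exact h
        · exact hm x hx
      · simpa [List.filter_cons, h] using hf
    · refine ⟨[], [], b :: s, by simp, by simp, by simp, ?_, ?_⟩
      · intro x hx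
        rcases List.mem_cons.mp hx with rfl | hx
        · exact h
        · exact lt_of_lt_of_le h (hb x hx)
      · rw [List.filter_eq_nil_iff]
        intro x hx
        rcases List.mem_cons.mp hx with rfl | hx
        · simpa using (by omega : ¬ key x = k)
        · simpa using (by have := hb x hx; omega : ¬ key x = k)

theorem cmerge_skip_left (p s1 s2 : List (List Int))
    (h : ∀ a ∈ p, ∀ b ∈ s2, pyKeyA a < pyKeyB b) :
    cmerge (p ++ s1) s2 = cmerge s1 s2 := by
  induction p with
  | nil => rfl
  | cons x p ih =>
    cases s2 with
    | nil => rw [cmerge_nil_right, cmerge_nil_right]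
    | cons b bs =>
      have hx := h x List.mem_cons_self b List.mem_cons_self
      show cmerge (x :: (p ++ s1)) (b :: bs) = _
      rw [cmerge, if_neg (by omega), if_pos hx]
      exact ih (fun a ha b' hb' => h a (List.mem_cons_of_mem _ ha) b' hb')

theorem cmerge_skip_right (p s1 s2 : List (List Int))
    (h : ∀ b ∈ p, ∀ a ∈ s1, pyKeyB b < pyKeyA a) :
    cmerge s1 (p ++ s2) = cmerge s1 s2 := by
  induction p with
  | nil => rfl
  | cons x p ih =>
    cases s1 with
    | nil => simp [cmerge]
    | cons a as =>
      have hx := h x List.mem_cons_self a List.mem_cons_self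
      show cmerge (a :: as) (x :: (p ++ s2)) = _
      rw [cmerge, if_neg (by omega), if_neg (by omega)]
      exact ih (fun b hb a' ha' => h b (List.mem_cons_of_mem _ hb) a' ha')

theorem cmerge_block (k : Int) (x1 r1 x2 r2 : List (List Int))
    (h1 : ∀ a ∈ x1, pyKeyA a = k) (h2 : ∀ b ∈ x2, pyKeyB b = k)
    (h3 : ∀ a ∈ r1, k < pyKeyA a) (h4 : ∀ b ∈ r2, k < pyKeyB b) :
    cmerge (x1 ++ r1) (x2 ++ r2) = (x1.zip x2).map (fun p => [p.1, p.2]) ++ cmerge r1 r2 := by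
  induction x1 generalizing x2 with
  | nil =>
    simp only [List.nil_append, List.zip_nil_left, List.map_nil, List.nil_append]
    exact cmerge_skip_right x2 r1 r2 (fun b hb a ha => (h2 b hb) ▸ h3 a ha)
  | cons a x1 ih =>
    cases x2 with
    | nil =>
      simp only [List.zip_nil_right, List.map_nil, List.nil_append]
      exact cmerge_skip_left (a :: x1) r1 r2
        (fun a' ha' b hb => (h1 a' ha') ▸ h4 b hb)
    | cons b x2 =>
      have ha : pyKeyA a = k := h1 a List.mem_cons_self
      have hb : pyKeyB b = k := h2 b List.mem_cons_self
      show cmerge (a :: (x1 ++ r1)) (b :: (x2 ++ r2)) = _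
      rw [cmerge, if_pos (by rw [ha, hb])]
      rw [ih x2 (fun a' ha' => h1 a' (List.mem_cons_of_mem _ ha'))
        (fun b' hb' => h2 b' (List.mem_cons_of_mem _ hb'))]
      simp

-- keys strictly grow from one block of sorted table1 to the rest
theorem rest_keys_gt (a : List Int) (as : List (List Int))
    (h : (a :: as).Pairwise (fun x y => pyKeyA x ≤ pyKeyA y)) :
    ∀ x ∈ as.dropWhile (fun x => pyKeyA x = pyKeyA a), pyKeyA a < pyKeyA x := by
  induction as with
  | nil => simp
  | cons y as ih =>
    obtain ⟨ha, hrest⟩ := List.pairwise_cons.mp h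
    by_cases hy : pyKeyA y = pyKeyA a
    · rw [List.dropWhile_cons_of_pos (by simpa using hy)]
      apply ih
      refine List.pairwise_cons.mpr ⟨?_, (List.pairwise_cons.mp hrest).2⟩
      exact fun x hx => ha x (List.mem_cons_of_mem _ hx)
    · rw [List.dropWhile_cons_of_neg (by simpa using hy)]
      intro x hx
      rcases List.mem_cons.mp hx with rfl | hx
      · exact lt_of_le_of_ne (ha x List.mem_cons_self) (Ne.symm hy)
      · have h1 : pyKeyA a ≤ pyKeyA y := ha y List.mem_cons_self
        have h2 : pyKeyA y ≤ pyKeyA x := (List.pairwise_cons.mp hrest).1 x hx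
        omega

theorem cmerge_eq_jblocks (n : Nat) : ∀ (s1 s2 : List (List Int)), s1.length ≤ n →
    s1.Pairwise (fun x y => pyKeyA x ≤ pyKeyA y) →
    s2.Pairwise (fun x y => pyKeyB x ≤ pyKeyB y) →
    cmerge s1 s2 = jblocks (fun k => s2.filter (fun b => pyKeyB b = k)) s1 := by
  intro s1 s2
  induction n generalizing s1 with
  | zero =>
    intro hn h1 h2
    have : s1 = [] := List.length_eq_zero_iff.mp (Nat.le_zero.mp hn)
    subst this
    simp [cmerge, jblocks]
  | succ n ih =>
    intro hn h1 h2
    cases s1 with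
    | nil => simp [cmerge, jblocks]
    | cons a as =>
      obtain ⟨p, m, q, e, hp, hm, hq, hf⟩ := sorted_filter_decomp pyKeyB s2 h2 (pyKeyA a)
      have hge : ∀ x ∈ a :: as, pyKeyA a ≤ pyKeyA x := by
        intro x hx
        rcases List.mem_cons.mp hx with rfl | hx
        · exact le_refl _
        · exact (List.pairwise_cons.mp h1).1 x hx
      have hblk : ∀ x ∈ a :: as.takeWhile (fun x => pyKeyA x = pyKeyA a), pyKeyA x = pyKeyA a := by
        intro x hx
        rcases List.mem_cons.mp hx with rfl | hx
        · rfl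
        · simpa using List.mem_takeWhile_imp hx
      have hrest := rest_keys_gt a as h1
      have hsplit : a :: as =
          (a :: as.takeWhile (fun x => pyKeyA x = pyKeyA a)) ++
            as.dropWhile (fun x => pyKeyA x = pyKeyA a) := by
        simp [List.takeWhile_append_dropWhile]
      calc cmerge (a :: as) s2
          = cmerge (a :: as) (p ++ (m ++ q)) := by rw [← List.append_assoc, ← e]
        _ = cmerge (a :: as) (m ++ q) := by
            refine cmerge_skip_right p (a :: as) (m ++ q) ?_
            intro b hb x hx
            exact lt_of_lt_of_le (hp b hb) (hge x hx)
        _ = ((a :: as.takeWhile (fun x => pyKeyA x = pyKeyA a)).zip m).map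
              (fun p => [p.1, p.2]) ++
            cmerge (as.dropWhile (fun x => pyKeyA x = pyKeyA a)) q := by
            rw [hsplit]
            exact cmerge_block (pyKeyA a) _ _ m q hblk hm hrest hq
        _ = ((a :: as.takeWhile (fun x => pyKeyA x = pyKeyA a)).zip m).map
              (fun p => [p.1, p.2]) ++
            cmerge (as.dropWhile (fun x => pyKeyA x = pyKeyA a)) s2 := by
            congr 1
            rw [e]
            refine (cmerge_skip_right (p ++ m) _ q ?_).symm
            intro b hb x hx
            rcases List.mem_append.mp hb with hb | hb
            · exact lt_of_lt_of_le (hp b hb) (le_of_lt (hrest x hx))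
            · exact (hm b hb) ▸ hrest x hx
        _ = jblocks (fun k => s2.filter (fun b => pyKeyB b = k)) (a :: as) := by
            rw [jblocks, hf]
            congr 1
            refine ih _ ?_ ?_ h2
            · have := List.length_dropWhile_le (fun x => decide (pyKeyA x = pyKeyA a)) as
              simp at hn; omega
            · exact List.Pairwise.sublist ((List.dropWhile_sublist _).cons _) h1

theorem buildGroups_foldl (t2 : List (List Int)) :
    ∀ (d : PySem.Dict Int (List (List Int))) (k : Int),
    (t2.foldl (fun d row => d.modify (pyKeyB row) [] (fun g => g ++ [row])) d).get? k =
      if t2.filter (fun b => pyKeyB b = k) = [] then d.get? k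
      else some (d.getD k [] ++ t2.filter (fun b => pyKeyB b = k)) := by
  induction t2 with
  | nil => intro d k; simp
  | cons b t2 ih =>
    intro d k
    rw [List.foldl_cons, ih]
    by_cases hk : pyKeyB b = k
    · have hfil : (b :: t2).filter (fun x => pyKeyB x = k) =
          b :: t2.filter (fun x => pyKeyB x = k) := by simp [hk]
      have hget : (d.modify (pyKeyB b) [] (fun g => g ++ [b])).getD k [] =
          d.getD k [] ++ [b] := by
        rw [hk, PySem.Dict.getD_modify]
        simp
      rw [hfil]
      by_cases h0 : t2.filter (fun x => pyKeyB x = k) = []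
      · rw [if_pos h0]
        simp only [h0, hk, PySem.Dict.modify, PySem.Dict.get?_insert,
          PySem.Dict.getD_eq_get?_getD]
        cases d.get? k <;> simp
      · rw [if_neg h0, if_neg (by simp), hget]
        simp
    · have hfil : (b :: t2).filter (fun x => pyKeyB x = k) =
          t2.filter (fun x => pyKeyB x = k) := by simp [hk]
      rw [hfil]
      have hget? : (d.modify (pyKeyB b) [] (fun g => g ++ [b])).get? k = d.get? k := by
        rw [PySem.Dict.modify, PySem.Dict.get?_insert, if_neg (fun h => hk h.symm)]
      have hgetD : (d.modify (pyKeyB b) [] (fun g => g ++ [b])).getD k [] =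
          d.getD k [] := by
        rw [PySem.Dict.getD_modify, if_neg (fun h => hk h.symm)]
      rw [hget?, hgetD]

theorem buildGroups_get? (t2 : List (List Int)) (k : Int) :
    (buildGroups t2).get? k =
      if t2.filter (fun b => pyKeyB b = k) = [] then none
      else some (t2.filter (fun b => pyKeyB b = k)) := by
  rw [buildGroups, buildGroups_foldl]
  split <;> simp

-- B's loop over one equal-key block, starting at consumption index r
theorem hopStep_block (groups : PySem.Dict Int (List (List Int))) (k : Int)
    (g : List (List Int)) (hg : groups.get? k = if g = [] then none else some g) :
    ∀ (blk : List (List Int)) (used : PySem.Dict Int Int) (out : List (List (List Int)))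
      (r : Int), (∀ x ∈ blk, pyKeyA x = k) → used.getD k 0 = r → 0 ≤ r →
    ∃ U, blk.foldl (hopStep groups) (used, out) =
        (U, out ++ ((blk.zip (g.drop r.toNat)).map (fun p => [p.1, p.2]))) ∧
      ∀ k', k' ≠ k → U.getD k' 0 = used.getD k' 0 := by
  intro blk
  induction blk with
  | nil =>
    intro used out r _ _ _
    exact ⟨used, by simp, fun _ _ => rfl⟩
  | cons x blk ih =>
    intro used out r hkeys hr hr0
    have hx : pyKeyA x = k := hkeys x List.mem_cons_self
    rw [List.foldl_cons]
    by_cases hgnil : g = []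
    · have hstep : hopStep groups (used, out) x = (used, out) := by
        rw [hopStep, hx, hg, if_pos hgnil]
      rw [hstep]
      obtain ⟨U, hU, hpres⟩ := ih used out r
        (fun y hy => hkeys y (List.mem_cons_of_mem _ hy)) hr hr0
      exact ⟨U, by rw [hU]; simp [hgnil], hpres⟩
    · have hsome : groups.get? k = some g := by rw [hg, if_neg hgnil]
      by_cases hlt : r < (g.length : Int)
      · have hrn : r.toNat < g.length := by omega
        have hstep : hopStep groups (used, out) x =
            (used.insert k (r + 1), out ++ [[x, g[r.toNat]]]) := by
          simp only [hopStep, hx, hsome, hr]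
          rw [if_pos hlt, PySem.List.pyGetD_eq_getElem g ([] : List Int) hr0 (by exact_mod_cast hlt)]
        rw [hstep]
        obtain ⟨U, hU, hpres⟩ := ih (used.insert k (r + 1)) (out ++ [[x, g[r.toNat]]]) (r + 1)
          (fun y hy => hkeys y (List.mem_cons_of_mem _ hy))
          (by rw [PySem.Dict.getD_insert, if_pos rfl]) (by omega)
        refine ⟨U, ?_, ?_⟩
        · rw [hU]
          have h1 : (r + 1).toNat = r.toNat + 1 := by omega
          rw [h1, List.drop_eq_getElem_cons hrn, List.zip_cons_cons]
          simp
        · intro k' hk'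
          rw [hpres k' hk', PySem.Dict.getD_insert, if_neg hk']
      · have hstep : hopStep groups (used, out) x = (used, out) := by
          simp only [hopStep, hx, hsome, hr]
          rw [if_neg hlt]
        have hdrop : g.drop r.toNat = [] := List.drop_eq_nil_of_le (by omega)
        rw [hstep]
        obtain ⟨U, hU, hpres⟩ := ih used out r
          (fun y hy => hkeys y (List.mem_cons_of_mem _ hy)) hr hr0
        exact ⟨U, by rw [hU]; simp [hdrop], hpres⟩

theorem foldl_hopStep_eq_jblocks (t2 : List (List Int)) (n : Nat) :
    ∀ (s1 : List (List Int)), s1.length ≤ n →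
    s1.Pairwise (fun x y => pyKeyA x ≤ pyKeyA y) →
    ∀ (used : PySem.Dict Int Int) (out : List (List (List Int))),
      (∀ a ∈ s1, used.getD (pyKeyA a) 0 = 0) →
    ∃ U, s1.foldl (hopStep (buildGroups t2)) (used, out) =
        (U, out ++ jblocks (fun k => t2.filter (fun b => pyKeyB b = k)) s1) ∧
      ∀ k', (∀ a ∈ s1, pyKeyA a ≠ k') → U.getD k' 0 = used.getD k' 0 := by
  induction n with
  | zero =>
    intro s1 hn _ used out _
    have : s1 = [] := List.length_eq_zero_iff.mp (Nat.le_zero.mp hn)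
    subst this
    exact ⟨used, by simp [jblocks], fun _ _ => rfl⟩
  | succ n ih =>
    intro s1 hn hpw used out hinv
    cases s1 with
    | nil => exact ⟨used, by simp [jblocks], fun _ _ => rfl⟩
    | cons a as =>
      have hblk : ∀ x ∈ a :: as.takeWhile (fun x => pyKeyA x = pyKeyA a),
          pyKeyA x = pyKeyA a := by
        intro x hx
        rcases List.mem_cons.mp hx with rfl | hx
        · rfl
        · simpa using List.mem_takeWhile_imp hx
      have hrest := rest_keys_gt a as hpw
      have hrsub : ∀ x ∈ as.dropWhile (fun x => pyKeyA x = pyKeyA a), x ∈ a :: as :=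
        fun x hx => List.mem_cons_of_mem _ ((List.dropWhile_sublist _).subset hx)
      have hsplit : a :: as =
          (a :: as.takeWhile (fun x => pyKeyA x = pyKeyA a)) ++
            as.dropWhile (fun x => pyKeyA x = pyKeyA a) := by
        simp [List.takeWhile_append_dropWhile]
      obtain ⟨U1, h1, hpres1⟩ := hopStep_block (buildGroups t2) (pyKeyA a)
        (t2.filter (fun b => pyKeyB b = pyKeyA a)) (buildGroups_get? t2 (pyKeyA a))
        (a :: as.takeWhile (fun x => pyKeyA x = pyKeyA a)) used out 0 hblk
        (hinv a List.mem_cons_self) le_rfl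
      obtain ⟨U, h2, hpres2⟩ := ih (as.dropWhile (fun x => pyKeyA x = pyKeyA a))
        (by have := List.length_dropWhile_le (fun x => decide (pyKeyA x = pyKeyA a)) as
            simp at hn; omega)
        (List.Pairwise.sublist ((List.dropWhile_sublist _).cons _) hpw) U1
        (out ++ ((a :: as.takeWhile (fun x => pyKeyA x = pyKeyA a)).zip
          (t2.filter (fun b => pyKeyB b = pyKeyA a))).map (fun p => [p.1, p.2]))
        (fun x hx => by
          rw [hpres1 _ (ne_of_gt (hrest x hx))]
          exact hinv x (hrsub x hx))
      refine ⟨U, ?_, ?_⟩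
      · rw [hsplit, List.foldl_append, h1]
        simp only [Int.toNat_zero, List.drop_zero] at h2 ⊢
        rw [h2]
        conv_rhs => rw [jblocks.eq_def]
        simp
      · intro k' hk'
        rw [hpres2 k' (fun x hx => hk' x (hrsub x hx)),
          hpres1 k' (fun h => hk' a List.mem_cons_self h.symm)]

-- ===== VERDICT (by name: the statement is the Claim_ definition above) =====
theorem table_hop_spec : Claim_equal_table_hop := by
  intro table1 table2 _ _
  have h1 := PySem.List.sorted_pairwise table1 pyKeyA
  have h2 := PySem.List.sorted_pairwise table2 pyKeyB
  obtain ⟨U, hU, -⟩ := foldl_hopStep_eq_jblocks (PySem.List.sorted table2 pyKeyB)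
    (PySem.List.sorted table1 pyKeyA).length (PySem.List.sorted table1 pyKeyA) le_rfl h1
    PySem.Dict.empty [] (fun a _ => PySem.Dict.getD_empty _ _)
  show tableHopLoop (PySem.List.sorted table1 pyKeyA) (PySem.List.sorted table2 pyKeyB)
      ((PySem.List.sorted table1 pyKeyA).length + (PySem.List.sorted table2 pyKeyB).length) 0 0 []
      = (List.foldl (hopStep (buildGroups (PySem.List.sorted table2 pyKeyB))) (PySem.Dict.empty, [])
          (PySem.List.sorted table1 pyKeyA)).2
  rw [tableHopLoop_eq_cmerge _ _ _ 0 0 [] (by omega), List.drop_zero, List.drop_zero, hU,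
    cmerge_eq_jblocks (PySem.List.sorted table1 pyKeyA).length _ _ le_rfl h1 h2]
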